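-- pv_equiv track=rewrite | github.com/pcingola/SnpEff | scripts_build/dbSnp/convert.py | getCaf
-- ===== SOURCE A (Python) =====
-- def getCaf(info: str) -> str:
--     """
--     Example: 'FREQ: 1000Genomes:0.006989,0.993|GENOME_DK:0,1|Korea1K:0.8689,0.1311'
--               => "0.006989,0.993"
--     """
--     freq = getFreq(info)
--     if not freq:
--         return None
--     for f in freq.split('|'):
--         if f.startswith('1000Genomes:'):
--             return f[12:]
--     return None
--
-- def getFreq(info: str) -> str:
--     """ Find 'FREQ=' in the INFO column """
--     idx = info.find('FREQ=')
--     if idx < 0: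
--         return None
--     idx2 = info.find(';', idx)
--     if idx2 < 0:
--         return info[idx+5:]
--     return info[idx+5:idx2]
-- ===== SOURCE B (Python) =====
-- def getFreq(info):
--     """ Find 'FREQ=' in the INFO column """
--     idx = info.find('FREQ=')
--     if idx < 0:
--         return None
--     idx2 = info.find(';', idx)
--     if idx2 < 0:
--         return info[idx+5:]
--     return info[idx+5:idx2]
--
--
-- def getCaf(info):
--     # Parse the whole FREQ payload into a population->frequencies index
--     # (first occurrence wins), then look up '1000Genomes'.
--     freq = getFreq(info)
--     if not freq:
--         return None
--     d = {}
--     for f in freq.split('|'):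
--         i = f.find(':')
--         if i >= 0 and f[:i] not in d:
--             d[f[:i]] = f[i+1:]
--     return d.get('1000Genomes')
-- ===== Notes on version B (the rewrite author's own statement) =====
-- stated objective: alternative
-- what changed: getCaf now parses the whole FREQ payload once into a population->value dict (first occurrence wins, split at the first ':') and then looks up '1000Genomes', instead of the short-circuit prefix scan over the '|'-pieces.
import Mathlib
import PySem

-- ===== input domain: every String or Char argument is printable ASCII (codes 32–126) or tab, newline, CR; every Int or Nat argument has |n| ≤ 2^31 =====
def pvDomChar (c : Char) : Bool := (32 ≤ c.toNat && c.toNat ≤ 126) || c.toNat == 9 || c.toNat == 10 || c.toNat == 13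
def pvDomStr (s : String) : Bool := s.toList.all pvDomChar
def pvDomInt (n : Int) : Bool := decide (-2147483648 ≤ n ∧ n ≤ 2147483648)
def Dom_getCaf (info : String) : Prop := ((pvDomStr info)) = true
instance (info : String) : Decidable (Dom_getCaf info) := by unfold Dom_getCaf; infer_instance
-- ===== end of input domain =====

-- B replaces A's short-circuit prefix scan of the '|'-pieces by a build-the-index-then-lookup
-- pass (a dict of first population->value entries, then one lookup); same return value, no speed claim.

-- ===== PORT A =====
-- shared helper: the module's getFreq, identical in Source A and Source B
def getFreq (info : String) : Option String :=
  let idx := PySem.Str.find info "FREQ="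
  if idx < 0 then none
  else
    let idx2 := PySem.Str.findFrom info ";" idx
    if idx2 < 0 then some (PySem.Str.slice info (some (idx + 5)) none)
    else some (PySem.Str.slice info (some (idx + 5)) (some idx2))

-- A's for-loop over freq.split('|') with early return
def getCafLoop : List String → Option String
  | [] => none
  | f :: fs =>
    if PySem.Str.startswith f "1000Genomes:" then some (PySem.Str.slice f (some 12) none)
    else getCafLoop fs

def getCaf (info : String) : Option String :=
  match getFreq info with
  | none => none
  | some freq =>
    if freq = "" then none
    else getCafLoop ((PySem.Str.split? freq "|").getD [])

-- ===== PORT B =====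
-- B's loop body: record pop -> value split at the first ':' , first occurrence wins
def getCafStep (d : PySem.Dict String String) (f : String) : PySem.Dict String String :=
  if 0 ≤ PySem.Str.find f ":" ∧
      d.contains (PySem.Str.slice f none (some (PySem.Str.find f ":"))) = false then
    d.insert (PySem.Str.slice f none (some (PySem.Str.find f ":")))
      (PySem.Str.slice f (some (PySem.Str.find f ":" + 1)) none)
  else d

def getCaf_alt (info : String) : Option String :=
  match getFreq info with
  | none => none
  | some freq =>
    if freq = "" then none
    else (((PySem.Str.split? freq "|").getD []).foldl getCafStep PySem.Dict.empty).get? "1000Genomes"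

-- ===== PRECONDITION & SPEC =====
def Spec_getCaf (info : String) (out : Option String) : Prop := out = getCaf_alt info
instance (info : String) (out : Option String) : Decidable (Spec_getCaf info out) := by unfold Spec_getCaf; infer_instance

-- ===== CLAIM (what is proved, stated in full; the proofs are below) =====
def Claim_equal_getCaf : Prop := ∀ (info : String), Dom_getCaf info → Spec_getCaf info (getCaf info)

-- ===== LEMMAS AND PROOFS =====

-- if '1000Genomes:' is a prefix of f then the first ':' of f is at index 11
lemma startswith_key_find (f : String)
    (h : PySem.Str.startswith f "1000Genomes:" = true) :
    PySem.Str.find f ":" = 11 := by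
  rw [PySem.Str.startswith_eq] at h
  rw [PySem.Str.find_eq]
  have hc : ":".toList = [':'] := by decide
  obtain ⟨r, hr⟩ := (PySem.Chars.startswith_iff _ _).mp h
  have hfl : f.toList = "1000Genomes".toList ++ (':' :: r) := by
    rw [← hr]
    have hP : "1000Genomes:".toList = "1000Genomes".toList ++ [':'] := by decide
    rw [hP, List.append_assoc]
    rfl
  have hinf : ":".toList <:+: f.toList := by
    rw [hc, hfl]
    exact ⟨"1000Genomes".toList, r, by simp⟩
  have hnn : 0 ≤ PySem.Chars.find f.toList ":".toList :=
    (PySem.Chars.find_nonneg_iff _ _).mpr hinf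
  obtain ⟨hpre, hmin⟩ := PySem.Chars.find_spec hnn
  set j := (PySem.Chars.find f.toList ":".toList).toNat with hj
  have hK : ("1000Genomes".toList).length = 11 := by decide
  have hdrop11 : List.drop 11 f.toList = ':' :: r := by
    rw [hfl, ← hK, List.drop_left]
  have hle : j ≤ 11 := by
    by_contra hgt
    exact hmin 11 (by omega) (by rw [hc, hdrop11]; exact ⟨r, rfl⟩)
  have hget : f.toList[j]? = some ':' := by
    rw [hc] at hpre
    obtain ⟨t, ht⟩ := hpre
    have h0 : (List.drop j f.toList)[0]? = some ':' := by rw [← ht]; rfl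
    rw [List.getElem?_drop] at h0
    simpa using h0
  have hne11 : ¬ j < 11 := by
    intro hlt
    have hP11 : j < ("1000Genomes:".toList).length := by
      have h12 : ("1000Genomes:".toList).length = 12 := by decide
      omega
    rw [← hr, List.getElem?_append_left hP11] at hget
    exact (by decide : ∀ jj, jj < 11 → ¬ ("1000Genomes:".toList)[jj]? = some ':') j hlt hget
  have hj11 : j = 11 := by omega
  omega

-- if '1000Genomes:' is a prefix of f then f[:11] = '1000Genomes'
lemma startswith_key_take (f : String)
    (h : PySem.Str.startswith f "1000Genomes:" = true) :
    PySem.Str.slice f none (some 11) = "1000Genomes" := by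
  rw [PySem.Str.startswith_eq] at h
  obtain ⟨r, hr⟩ := (PySem.Chars.startswith_iff _ _).mp h
  rw [← String.toList_inj, PySem.Str.toList_slice, PySem.Chars.slice_eq_listSlice,
    PySem.List.slice_to _ (by norm_num : (0:Int) ≤ 11), ← hr,
    List.take_append_of_le_length (by decide)]
  decide

-- if f[:f.find(':')] = '1000Genomes' (with ':' present) then '1000Genomes:' is a prefix of f
lemma not_startswith_key (f : String)
    (h : PySem.Str.startswith f "1000Genomes:" = false)
    (hi : 0 ≤ PySem.Str.find f ":") :
    PySem.Str.slice f none (some (PySem.Str.find f ":")) ≠ "1000Genomes" := by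
  intro heq
  rw [PySem.Str.find_eq] at hi heq
  rw [PySem.Str.startswith_eq] at h
  have hc : ":".toList = [':'] := by decide
  obtain ⟨hpre, -⟩ := PySem.Chars.find_spec hi
  rw [← String.toList_inj, PySem.Str.toList_slice, PySem.Chars.slice_eq_listSlice,
    PySem.List.slice_to _ hi] at heq
  have hget : f.toList[(PySem.Chars.find f.toList ":".toList).toNat]? = some ':' := by
    obtain ⟨t, ht⟩ := hpre
    have h0 : (List.drop (PySem.Chars.find f.toList ":".toList).toNat f.toList)[0]? = some ':' := by
      rw [← ht, hc]; rfl
    rw [List.getElem?_drop] at h0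
    simpa using h0
  have hlen : (PySem.Chars.find f.toList ":".toList).toNat < f.toList.length := by
    obtain ⟨hlt, -⟩ := List.getElem?_eq_some_iff.mp hget
    exact hlt
  have hj11 : (PySem.Chars.find f.toList ":".toList).toNat = 11 := by
    have hlt := congrArg List.length heq
    rw [List.length_take] at hlt
    have hK : ("1000Genomes".toList).length = 11 := by decide
    omega
  rw [hj11] at hget heq hlen
  have hdrop : List.drop 11 f.toList = ':' :: List.drop 12 f.toList := by
    rw [List.drop_eq_getElem_cons hlen]
    refine congrArg₂ List.cons ?_ (by norm_num)
    obtain ⟨hlt, he⟩ := List.getElem?_eq_some_iff.mp hget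
    exact he
  have happ : "1000Genomes:".toList ++ List.drop 12 f.toList = f.toList := by
    have hP : "1000Genomes:".toList = "1000Genomes".toList ++ [':'] := by decide
    rw [hP, List.append_assoc, List.singleton_append, ← hdrop, ← heq,
      List.take_append_drop]
  have hsw : PySem.Chars.startswith f.toList "1000Genomes:".toList = true :=
    (PySem.Chars.startswith_iff _ _).mpr ⟨_, happ⟩
  rw [h] at hsw
  exact Bool.noConfusion hsw

-- the dict lookup after the whole fold = first short-circuit match (invariant over the accumulator)
lemma fold_get (fs : List String) (d : PySem.Dict String String) :
    (fs.foldl getCafStep d).get? "1000Genomes" =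
      (d.get? "1000Genomes").or (getCafLoop fs) := by
  induction fs generalizing d with
  | nil => simp [getCafLoop]
  | cons f fs ih =>
    rw [List.foldl_cons, ih]
    rcases hd : d.get? "1000Genomes" with _ | v
    · rw [Option.none_or]
      by_cases hsw : PySem.Str.startswith f "1000Genomes:" = true
      · have hstep : getCafStep d f =
            d.insert "1000Genomes" (PySem.Str.slice f (some (11 + 1)) none) := by
          unfold getCafStep
          rw [startswith_key_find f hsw, startswith_key_take f hsw,
            if_pos ⟨by norm_num, (PySem.Dict.get?_eq_none_iff_contains d _).mp hd⟩]
        rw [hstep, PySem.Dict.get?_insert_self, Option.some_or]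
        simp only [getCafLoop]
        rw [if_pos hsw]
        norm_num
      · rw [Bool.not_eq_true] at hsw
        have hstep : (getCafStep d f).get? "1000Genomes" = none := by
          unfold getCafStep
          split_ifs with hcond
          · rw [PySem.Dict.get?_insert_of_ne _ _ (Ne.symm (not_startswith_key f hsw hcond.1))]
            exact hd
          · exact hd
        rw [hstep, Option.none_or]
        simp only [getCafLoop]
        rw [if_neg (by rw [hsw]; decide)]
    · have hstep : (getCafStep d f).get? "1000Genomes" = some v := by
        unfold getCafStep
        split_ifs with hcond
        · by_cases hk : PySem.Str.slice f none (some (PySem.Str.find f ":")) = "1000Genomes"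
          · exfalso
            have hnone : d.get? "1000Genomes" = none :=
              (PySem.Dict.get?_eq_none_iff_contains d _).mpr (by rw [← hk]; exact hcond.2)
            exact Option.some_ne_none v (hd ▸ hnone)
          · rw [PySem.Dict.get?_insert_of_ne _ _ (Ne.symm hk)]
            exact hd
        · exact hd
      rw [hstep, Option.some_or, Option.some_or]

-- ===== VERDICT (by name: the statement is the Claim_ definition above) =====
theorem getCaf_spec : Claim_equal_getCaf := by
  intro info _
  unfold Spec_getCaf getCaf getCaf_alt
  cases getFreq info with
  | none => rfl
  | some freq =>
    show (if freq = "" then none else getCafLoop ((PySem.Str.split? freq "|").getD [])) =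
      (if freq = "" then none
       else (((PySem.Str.split? freq "|").getD []).foldl getCafStep
          PySem.Dict.empty).get? "1000Genomes")
    by_cases h : freq = ""
    · rw [if_pos h, if_pos h]
    · rw [if_neg h, if_neg h, fold_get, PySem.Dict.get?_empty, Option.none_or]
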